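-- pv_equiv track=rewrite | github.com/abdulaziz2501/UzDataLab_json_file_edits | yangi_json.py | find_unique_texts_detailed
-- ===== SOURCE A (Python) =====
-- from collections import defaultdict, Counter
--
-- def find_unique_texts_detailed(json_data):
--     """Noyob matnlarni topish va batafsil tahlil"""
--     text_counts = Counter()
--     text_to_items = defaultdict(list)
--
--     for item in json_data:
--         text = item.get('text', '').strip()
--         if text:
--             text_counts[text] += 1
--             text_to_items[text].append(item)
--
--     unique_items = []
--     for text, count in text_counts.items():
--         if count == 1:
--             unique_items.extend(text_to_items[text])
--
--     duplicate_texts = {text: count for text, count in text_counts.items() if count > 1}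
--     return unique_items, duplicate_texts, text_counts
-- ===== SOURCE B (Python) =====
-- from collections import Counter
--
-- def find_unique_texts_detailed(json_data):
--     """Noyob matnlarni topish va batafsil tahlil"""
--     pairs = [(item.get('text', '').strip(), item) for item in json_data]
--     text_counts = Counter(t for t, _ in pairs if t)
--     unique_items = [item for t, item in pairs if text_counts[t] == 1]
--     duplicate_texts = {t: c for t, c in text_counts.items() if c > 1}
--     return unique_items, duplicate_texts, text_counts
-- ===== Notes on version B (the rewrite author's own statement) =====
-- stated objective: alternative
-- what changed: B drops A's text_to_items grouping dict entirely: it builds only a Counter of stripped texts and then obtains unique_items by filtering the original item list on count==1 (valid because a count-1 text has exactly one item, in list order), instead of A's second dict plus a loop over the counter extending grouped item lists.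
import Mathlib
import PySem

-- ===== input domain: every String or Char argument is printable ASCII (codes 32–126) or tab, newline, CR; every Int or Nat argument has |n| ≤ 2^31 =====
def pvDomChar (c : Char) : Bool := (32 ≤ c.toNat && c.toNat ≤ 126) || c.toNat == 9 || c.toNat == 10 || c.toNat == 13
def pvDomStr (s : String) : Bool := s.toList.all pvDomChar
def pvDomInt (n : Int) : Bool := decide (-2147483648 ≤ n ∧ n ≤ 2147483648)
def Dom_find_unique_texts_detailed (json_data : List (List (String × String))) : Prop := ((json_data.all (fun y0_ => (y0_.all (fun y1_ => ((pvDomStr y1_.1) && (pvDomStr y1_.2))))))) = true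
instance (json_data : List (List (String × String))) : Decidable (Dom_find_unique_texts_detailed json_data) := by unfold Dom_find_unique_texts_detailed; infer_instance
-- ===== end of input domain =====

-- B drops A's text_to_items grouping dict: it builds only a Counter of stripped texts and
-- gets unique_items by filtering the original item list on count == 1; objective: alternative.

-- item.get('text', '') on the association-list encoding of a dict (first match), then .strip()
def pvText (item : List (String × String)) : String :=
  PySem.Str.strip (((item.find? (fun p => p.1 == "text")).map (·.2)).getD "")

-- ===== PORT A =====
-- the body of A's single 'for item in json_data' loop, updating text_counts and text_to_items
def pvStepA (st : PySem.Dict String Int × PySem.Dict String (List (List (String × String))))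
    (item : List (String × String)) :
    PySem.Dict String Int × PySem.Dict String (List (List (String × String))) :=
  let text := pvText item
  if text ≠ "" then (st.1.modify text 0 (· + 1), st.2.modify text [] (· ++ [item])) else st

def find_unique_texts_detailed (json_data : List (List (String × String))) : (List (List (String × String))) × (List (String × Int)) × (List (String × Int)) :=
  let st := json_data.foldl pvStepA (PySem.Dict.empty, PySem.Dict.empty)
  -- for text, count in text_counts.items(): if count == 1: unique_items.extend(text_to_items[text])
  let unique_items := st.1.items.foldl
    (fun acc p => if p.2 == 1 then acc ++ st.2.getD p.1 [] else acc) []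
  -- {text: count for text, count in text_counts.items() if count > 1}
  let duplicate_texts := st.1.items.foldl
    (fun (d : PySem.Dict String Int) p => if p.2 > 1 then d.insert p.1 p.2 else d)
    PySem.Dict.empty
  (unique_items, duplicate_texts.items, st.1.items)

-- ===== PORT B =====
def find_unique_texts_detailed_alt (json_data : List (List (String × String))) : (List (List (String × String))) × (List (String × Int)) × (List (String × Int)) :=
  -- pairs = [(item.get('text','').strip(), item) for item in json_data]
  let pairs := json_data.map (fun item => (pvText item, item))
  -- text_counts = Counter(t for t, _ in pairs if t)
  let text_counts := PySem.Dict.counter ((pairs.filter (fun p => p.1 != "")).map Prod.fst)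
  -- unique_items = [item for t, item in pairs if text_counts[t] == 1]
  let unique_items := (pairs.filter (fun p => text_counts.getD p.1 0 == 1)).map Prod.snd
  -- duplicate_texts = {t: c for t, c in text_counts.items() if c > 1}
  let duplicate_texts := text_counts.items.filter (fun p => p.2 > 1)
  (unique_items, duplicate_texts, text_counts.items)

-- ===== PRECONDITION & SPEC =====
def Spec_find_unique_texts_detailed (json_data : List (List (String × String))) (out : (List (List (String × String))) × (List (String × Int)) × (List (String × Int))) : Prop := out = find_unique_texts_detailed_alt json_data
instance (json_data : List (List (String × String))) (out : (List (List (String × String))) × (List (String × Int)) × (List (String × Int))) : Decidable (Spec_find_unique_texts_detailed json_data out) := by unfold Spec_find_unique_texts_detailed; infer_instance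

-- ===== CLAIM (what is proved, stated in full; the proofs are below) =====
def Claim_equal_find_unique_texts_detailed : Prop := ∀ (json_data : List (List (String × String))), Dom_find_unique_texts_detailed json_data → Spec_find_unique_texts_detailed json_data (find_unique_texts_detailed json_data)

-- ===== LEMMAS AND PROOFS =====

-- the (stripped text, item) pairs with non-empty text, and their text list
def pvPairsNE (l : List (List (String × String))) : List (String × List (String × String)) :=
  (l.map (fun it => (pvText it, it))).filter (fun p => p.1 != "")

def pvTexts (l : List (List (String × String))) : List String := (pvPairsNE l).map Prod.fst

-- A's single loop is the counting loop and the grouping loop over the non-empty pairs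
theorem pvFoldA (l : List (List (String × String)))
    (d : PySem.Dict String Int) (g : PySem.Dict String (List (List (String × String)))) :
    l.foldl pvStepA (d, g)
      = ((pvPairsNE l).foldl (fun d p => d.modify p.1 0 (· + 1)) d,
         (pvPairsNE l).foldl (fun g p => g.modify p.1 [] (· ++ [p.2])) g) := by
  induction l generalizing d g with
  | nil => rfl
  | cons it rest ih =>
    simp only [List.foldl_cons, pvPairsNE, List.map_cons, List.filter_cons]
    by_cases h : pvText it = ""
    · simp only [pvStepA, h, ih]
      simp [pvPairsNE]
    · simp only [pvStepA, ih]
      simp [h, pvPairsNE]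

theorem pvFlatMapCongr {α β : Type} (l : List α) (f g : α → List β)
    (h : ∀ x ∈ l, f x = g x) : l.flatMap f = l.flatMap g := by
  induction l with
  | nil => rfl
  | cons x rest ih =>
    simp only [List.flatMap_cons, h x (List.mem_cons_self), ih (fun y hy => h y (List.mem_cons_of_mem _ hy))]

-- ((n : Int) == 1) is (n == 1)
theorem pvIntOne (n : Nat) : ((n : Int) == 1) = (n == 1) := by
  by_cases h : n = 1
  · subst h; rfl
  · have h2 : (n : Int) ≠ 1 := by exact_mod_cast h
    simp [h, h2]

-- CORE: distinct keys in first-occurrence order, each key of count 1 contributing its (single)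
-- matching pair, concatenate = filter of the original pair list on count == 1
theorem pvCore {α : Type} (ps : List (String × α)) (K : String → Bool) :
    (PySem.Set.ofList (ps.map Prod.fst)).flatMap
        (fun k => if ((ps.map Prod.fst).count k == 1 && K k) then ps.filter (fun p => p.1 == k) else [])
      = ps.filter (fun p => (ps.map Prod.fst).count p.1 == 1 && K p.1) := by
  induction ps using List.reverseRecOn generalizing K with
  | nil => simp
  | append_singleton ps q ih =>
    have hmap : (ps ++ [q]).map Prod.fst = ps.map Prod.fst ++ [q.1] := by simp
    rw [hmap, PySem.Set.ofList_append_singleton]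
    have hcnt : ∀ k, (ps.map Prod.fst ++ [q.1]).count k
        = (ps.map Prod.fst).count k + (if q.1 = k then 1 else 0) := by
      intro k
      by_cases h : q.1 = k
      · subst h; simp [List.count_append]
      · simp [List.count_append, h]
    have hfilt : ∀ k, (ps ++ [q]).filter (fun p => p.1 == k)
        = ps.filter (fun p => p.1 == k) ++ (if q.1 = k then [q] else []) := by
      intro k
      rw [List.filter_append]
      by_cases h : q.1 = k <;> simp [h]
    by_cases ht : q.1 ∈ ps.map Prod.fst
    · -- q's text already occurred: its count leaves 1, its key is not new
      rw [PySem.Set.add_of_mem ((PySem.Set.mem_ofList _ _).mpr ht)]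
      have hpos : 0 < (ps.map Prod.fst).count q.1 := List.count_pos_iff.mpr ht
      have hL : (PySem.Set.ofList (ps.map Prod.fst)).flatMap
            (fun k => if ((ps.map Prod.fst ++ [q.1]).count k == 1 && K k)
              then (ps ++ [q]).filter (fun p => p.1 == k) else [])
          = (PySem.Set.ofList (ps.map Prod.fst)).flatMap
            (fun k => if ((ps.map Prod.fst).count k == 1 && (K k && !(k == q.1)))
              then ps.filter (fun p => p.1 == k) else []) := by
        apply pvFlatMapCongr
        intro k _
        by_cases hk : q.1 = k
        · subst hk
          have h1 : ((ps.map Prod.fst ++ [q.1]).count q.1 == 1) = false := by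
            rw [hcnt]; simp; omega
          simp only [h1, Bool.false_and]
          simp
        · rw [hcnt, if_neg hk, hfilt, if_neg hk]
          simp [beq_iff_eq, Ne.symm hk]
      rw [hL, ih]
      rw [List.filter_append]
      have hq : ((ps.map Prod.fst ++ [q.1]).count q.1 == 1 && K q.1) = false := by
        rw [hcnt]; simp; omega
      rw [show [q].filter (fun p => (ps.map Prod.fst ++ [q.1]).count p.1 == 1 && K p.1) = [] by
        simp only [List.filter_cons, hq]; rfl]
      rw [List.append_nil]
      apply List.filter_congr
      intro p _
      by_cases hp : q.1 = p.1
      · rw [← hp, hq]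
        have : ((ps.map Prod.fst).count q.1 == 1 && (K q.1 && !(q.1 == q.1))) = false := by simp
        rw [← hp] at *
        simp
      · rw [hcnt, if_neg hp]
        have hb : (p.1 == q.1) = false := beq_eq_false_iff_ne.mpr (fun h => hp h.symm)
        simp [hb]
    · -- fresh text: it is appended to the key set with count 1
      rw [PySem.Set.add_of_not_mem (fun h => ht ((PySem.Set.mem_ofList _ _).mp h))]
      rw [List.flatMap_append]
      have hnil : ps.filter (fun p => p.1 == q.1) = [] := by
        apply List.filter_eq_nil_iff.mpr
        intro p hp
        simp only [beq_iff_eq]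
        exact fun h => ht (h ▸ List.mem_map_of_mem hp)
      have hL : (PySem.Set.ofList (ps.map Prod.fst)).flatMap
            (fun k => if ((ps.map Prod.fst ++ [q.1]).count k == 1 && K k)
              then (ps ++ [q]).filter (fun p => p.1 == k) else [])
          = (PySem.Set.ofList (ps.map Prod.fst)).flatMap
            (fun k => if ((ps.map Prod.fst).count k == 1 && K k)
              then ps.filter (fun p => p.1 == k) else []) := by
        apply pvFlatMapCongr
        intro k hk
        have hkne : q.1 ≠ k := by
          intro h; exact ht (h ▸ ((PySem.Set.mem_ofList _ _).mp hk))
        rw [hcnt, if_neg hkne, hfilt, if_neg hkne]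
        simp
      rw [hL, ih]
      have hq1 : (ps.map Prod.fst ++ [q.1]).count q.1 = 1 := by
        rw [hcnt, if_pos rfl, List.count_eq_zero.mpr ht]
      have htail : [q.1].flatMap (fun k => if ((ps.map Prod.fst ++ [q.1]).count k == 1 && K k)
            then (ps ++ [q]).filter (fun p => p.1 == k) else [])
          = if K q.1 then [q] else [] := by
        simp only [List.flatMap_cons, List.flatMap_nil, List.append_nil, hq1, hfilt, hnil]
        by_cases h : K q.1 <;> simp [h]
      rw [htail, List.filter_append]
      have hhead : ps.filter (fun p => (ps.map Prod.fst ++ [q.1]).count p.1 == 1 && K p.1)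
          = ps.filter (fun p => (ps.map Prod.fst).count p.1 == 1 && K p.1) := by
        apply List.filter_congr
        intro p hp
        have hpne : q.1 ≠ p.1 := by
          intro h; exact ht (h ▸ List.mem_map_of_mem hp)
        rw [hcnt, if_neg hpne]
        simp
      rw [hhead]
      have hqtail : [q].filter (fun p => (ps.map Prod.fst ++ [q.1]).count p.1 == 1 && K p.1)
          = if K q.1 then [q] else [] := by
        simp only [List.filter_cons, hq1]
        by_cases h : K q.1 <;> simp [h]
      rw [hqtail]

-- a filtered insert loop is an insert loop over the filtered list
theorem pvFoldIf (l : List (String × Int)) (d : PySem.Dict String Int) :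
    l.foldl (fun (d : PySem.Dict String Int) p => if p.2 > 1 then d.insert p.1 p.2 else d) d
      = (l.filter (fun p => p.2 > 1)).foldl (fun d p => d.insert p.1 p.2) d := by
  induction l generalizing d with
  | nil => rfl
  | cons p rest ih =>
    simp only [List.foldl_cons, List.filter_cons]
    by_cases h : p.2 > 1
    · simp [h, ih]
    · simp [h, ih]

-- "" never occurs among the counted texts
theorem pvTexts_ne_empty (l : List (List (String × String))) : "" ∉ pvTexts l := by
  intro h
  obtain ⟨p, hp, hp1⟩ := List.mem_map.mp h
  have := List.of_mem_filter hp
  rw [hp1] at this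
  simp at this

-- ===== VERDICT (by name: the statement is the Claim_ definition above) =====
theorem find_unique_texts_detailed_spec : Claim_equal_find_unique_texts_detailed := by
  intro json_data _
  show find_unique_texts_detailed json_data = find_unique_texts_detailed_alt json_data
  unfold find_unique_texts_detailed find_unique_texts_detailed_alt
  rw [pvFoldA]
  have hcounter : (pvPairsNE json_data).foldl (fun d p => d.modify p.1 0 (· + 1))
        (PySem.Dict.empty : PySem.Dict String Int)
      = PySem.Dict.counter (pvTexts json_data) := by
    rw [PySem.Dict.counter_eq_foldl, pvTexts, List.foldl_map]
  have hpairs : (json_data.map (fun item => (pvText item, item))).filter (fun p => p.1 != "")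
      = pvPairsNE json_data := rfl
  have hgetD : ∀ t, ((pvPairsNE json_data).foldl (fun g p => g.modify p.1 [] (· ++ [p.2]))
        (PySem.Dict.empty : PySem.Dict String (List (List (String × String))))).getD t []
      = ((pvPairsNE json_data).filter (fun p => p.1 == t)).map (·.2) := by
    intro t
    rw [PySem.Dict.getD_foldl_modify_append, PySem.Dict.getD_empty, List.nil_append]
  have hTex : (pvPairsNE json_data).map Prod.fst = pvTexts json_data := rfl
  simp only [hcounter, hpairs, hTex]
  refine Prod.ext ?_ (Prod.ext ?_ ?_)
  · -- unique_items
    have h1 : (PySem.Dict.counter (pvTexts json_data)).items.foldl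
          (fun acc p => if p.2 == 1 then acc ++ ((pvPairsNE json_data).foldl
            (fun g q => g.modify q.1 [] (· ++ [q.2])) PySem.Dict.empty).getD p.1 [] else acc) []
        = (PySem.Dict.counter (pvTexts json_data)).items.foldl
          (fun acc p => acc ++ (if p.2 == 1
            then ((pvPairsNE json_data).filter (fun q => q.1 == p.1)).map (·.2) else [])) [] := by
      apply PySem.List.foldl_congr_mem
      intro acc p _
      rw [hgetD]
      by_cases h : p.2 == 1 <;> simp [h]
    rw [h1, PySem.List.foldl_append_eq_flatMap, List.nil_append, PySem.Dict.items_counter,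
      List.flatMap_map]
    have h2 : (PySem.Set.ofList (pvTexts json_data)).flatMap
          (fun k => if (((pvTexts json_data).count k : Int) == 1)
            then ((pvPairsNE json_data).filter (fun q => q.1 == k)).map (·.2) else [])
        = ((PySem.Set.ofList (pvTexts json_data)).flatMap
          (fun k => if ((pvTexts json_data).count k == 1 && true)
            then (pvPairsNE json_data).filter (fun q => q.1 == k) else [])).map (·.2) := by
      rw [List.map_flatMap]
      apply pvFlatMapCongr
      intro k _
      rw [pvIntOne, Bool.and_true]
      by_cases h : (pvTexts json_data).count k == 1 <;> simp [h]
    rw [h2, show PySem.Set.ofList (pvTexts json_data)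
        = PySem.Set.ofList ((pvPairsNE json_data).map Prod.fst) from rfl,
      show pvTexts json_data = (pvPairsNE json_data).map Prod.fst from rfl, pvCore]
    simp only [hTex]
    -- B side: filtering all pairs equals filtering the non-empty pairs
    have h3 : (json_data.map (fun item => (pvText item, item))).filter
          (fun p => (PySem.Dict.counter (pvTexts json_data)).getD p.1 0 == 1)
        = (pvPairsNE json_data).filter
          (fun p => (pvTexts json_data).count p.1 == 1 && true) := by
      rw [pvPairsNE, List.filter_filter]
      apply List.filter_congr
      intro p _
      rw [PySem.Dict.getD_counter, pvIntOne, Bool.and_true]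
      by_cases hp : p.1 = ""
      · have : (pvTexts json_data).count p.1 = 0 := by
          rw [hp]; exact List.count_eq_zero.mpr (pvTexts_ne_empty json_data)
        rw [hp] at this
        simp [hp, this]
      · have hb : (p.1 != "") = true := by simp [hp]
        simp [hb]
    rw [h3]
  · -- duplicate_texts
    rw [pvFoldIf]
    have hnodup : (((PySem.Dict.counter (pvTexts json_data)).items.filter
        (fun p => p.2 > 1)).map Prod.fst).Nodup := by
      have hsub : (((PySem.Dict.counter (pvTexts json_data)).items.filter
          (fun p => p.2 > 1)).map Prod.fst).Sublist
          ((PySem.Dict.counter (pvTexts json_data)).items.map Prod.fst) :=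
        List.Sublist.map _ List.filter_sublist
      exact hsub.nodup (PySem.Dict.nodup_keys_counter _)
    have hfresh := PySem.Dict.items_foldl_insert_fresh
      ((PySem.Dict.counter (pvTexts json_data)).items.filter (fun p => p.2 > 1))
      Prod.fst Prod.snd PySem.Dict.empty
      (fun a _ => PySem.Dict.contains_empty _) hnodup
    simpa using hfresh
  · -- text_counts
    rfl
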